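-- pv_equiv track=rewrite | github.com/Daba-byte/SWEA | IM대비_연습/스위치조작.py | turn_switch
-- ===== SOURCE A (Python) =====
-- def turn_switch(N, before, after): # ptsd 오자낭..
--     switch_count = 0 # 이겨낸다
--     for i in range(N):
--         if before[i] != after[i]: # 안똑같으면
--             switch_count += 1 # 일단 바꾸니까 카운트 올려
--             for j in range(i, N):
--                 before[j] = 1- before[j] # ㄹㅇ 바꿔
--
--     return switch_count # ㅋㅋ 아이엠 딱대 개쉽네
-- ===== SOURCE B (Python) =====
-- def turn_switch(N, before, after):
--     count = 0
--     flipped = False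
--     for i in range(N):
--         x = before[i]
--         if (1 - x if flipped else x) != after[i]:
--             count += 1
--             flipped = not flipped
--     return count
-- ===== Notes on version B (the rewrite author's own statement) =====
-- stated objective: faster
-- what changed: Replaces A's nested suffix-flipping loops (which rewrite before[i..N) on every mismatch) with a single pass that tracks the accumulated flip parity and counts where the effective value differs from after[i]; B also does not mutate before.
import Mathlib
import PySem

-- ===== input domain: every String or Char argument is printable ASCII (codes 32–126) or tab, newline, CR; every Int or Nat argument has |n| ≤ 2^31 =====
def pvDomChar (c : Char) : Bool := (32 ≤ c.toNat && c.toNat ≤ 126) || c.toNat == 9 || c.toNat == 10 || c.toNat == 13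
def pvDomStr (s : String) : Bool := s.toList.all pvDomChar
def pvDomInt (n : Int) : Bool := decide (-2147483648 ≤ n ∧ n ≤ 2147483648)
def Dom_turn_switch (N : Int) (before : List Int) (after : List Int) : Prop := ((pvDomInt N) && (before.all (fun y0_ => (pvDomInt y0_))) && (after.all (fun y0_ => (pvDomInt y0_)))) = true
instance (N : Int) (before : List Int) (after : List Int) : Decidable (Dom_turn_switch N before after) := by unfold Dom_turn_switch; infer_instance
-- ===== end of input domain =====

-- B replaces A's nested suffix-flipping loops by one pass tracking flip parity (O(N) vs O(N^2));
-- A mutates `before` in place, B does not: the equivalence proved here is about the return value only.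


-- ===== PORT A =====
-- inner loop 'for j in range(i, N): before[j] = 1 - before[j]', with fuel m = N - j
def flipLoop : Nat → List Int → Nat → List Int
  | 0, l, _ => l
  | m+1, l, j =>
      flipLoop m (PySem.List.pySetD l (j : Int) (1 - PySem.List.pyGetD l (j : Int) 0)) (j+1)

-- outer loop 'for i in range(N)' over mutable state (before, switch_count), fuel n = N - i
def aLoop (a : List Int) : Nat → List Int → Nat → Int → Int
  | 0, _, _, c => c
  | n+1, l, i, c =>
      if PySem.List.pyGetD l (i : Int) 0 ≠ PySem.List.pyGetD a (i : Int) 0 then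
        aLoop a n (flipLoop (n+1) l i) (i+1) (c+1)
      else
        aLoop a n l (i+1) c

def turn_switch (N : Int) (before : List Int) (after : List Int) : Int :=
  aLoop after N.toNat before 0 0

-- ===== PORT B =====
-- single pass: flip parity + mismatch counter, fuel n = N - i
def bLoop (b a : List Int) : Nat → Nat → Bool → Int → Int
  | 0, _, _, c => c
  | n+1, i, flipped, c =>
      let x := PySem.List.pyGetD b (i : Int) 0
      if (if flipped then 1 - x else x) ≠ PySem.List.pyGetD a (i : Int) 0 then
        bLoop b a n (i+1) (!flipped) (c+1)
      else
        bLoop b a n (i+1) flipped c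

def turn_switch_alt (N : Int) (before : List Int) (after : List Int) : Int :=
  bLoop before after N.toNat 0 false 0

-- ===== PRECONDITION & SPEC =====
-- Pre_ excludes exactly the inputs where Python A raises IndexError (N exceeds a list's length);
-- Python B raises there too.
def Pre_turn_switch (N : Int) (before : List Int) (after : List Int) : Prop :=
  N ≤ (before.length : Int) ∧ N ≤ (after.length : Int)
instance (N : Int) (before : List Int) (after : List Int) : Decidable (Pre_turn_switch N before after) := by unfold Pre_turn_switch; infer_instance
def pvWitness_turn_switch : Int × List Int × List Int := (3, [0, 1, 1], [1, 1, 0])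

def Spec_turn_switch (N : Int) (before : List Int) (after : List Int) (out : Int) : Prop := out = turn_switch_alt N before after
instance (N : Int) (before : List Int) (after : List Int) (out : Int) : Decidable (Spec_turn_switch N before after out) := by unfold Spec_turn_switch; infer_instance

-- ===== CLAIM (what is proved, stated in full; the proofs are below) =====
def Claim_equal_turn_switch : Prop := ∀ (N : Int) (before : List Int) (after : List Int), Dom_turn_switch N before after → Pre_turn_switch N before after → Spec_turn_switch N before after (turn_switch N before after)

-- ===== LEMMAS AND PROOFS =====

theorem flipLoop_length (m : Nat) : ∀ (l : List Int) (j : Nat), (flipLoop m l j).length = l.length := by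
  induction m with
  | zero => intro l j; rfl
  | succ m ih => intro l j; rw [flipLoop, ih]; simp

theorem flipLoop_getD (m : Nat) : ∀ (l : List Int) (j k : Nat), k < l.length →
    (flipLoop m l j).getD k 0 = if j ≤ k ∧ k < j + m then 1 - l.getD k 0 else l.getD k 0 := by
  induction m with
  | zero =>
      intro l j k hk
      rw [flipLoop, if_neg (by omega)]
  | succ m ih =>
      intro l j k hk
      rw [flipLoop, ih _ _ _ (by simpa using hk)]
      simp only [PySem.List.pySetD_natCast, PySem.List.pyGetD_natCast]
      rcases Nat.lt_trichotomy k j with hkj | rfl | hjk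
      · have hne : j ≠ k := by omega
        have h1 : ¬ (j + 1 ≤ k ∧ k < j + 1 + m) := by omega
        have h2 : ¬ (j ≤ k ∧ k < j + (m + 1)) := by omega
        simp [List.getD_eq_getElem?_getD, hne, h2]
        omega
      · have h1 : ¬ (k + 1 ≤ k ∧ k < k + 1 + m) := by omega
        have h2 : k ≤ k ∧ k < k + (m + 1) := by omega
        simp [List.getD_eq_getElem?_getD, hk, h2]
      · have hne : j ≠ k := by omega
        simp only [List.getD_eq_getElem?_getD, List.getElem?_set, if_neg hne]
        by_cases hc : k < j + 1 + m
        · have h1 : j + 1 ≤ k ∧ k < j + 1 + m := ⟨by omega, hc⟩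
          have h2 : j ≤ k ∧ k < j + (m + 1) := ⟨by omega, by omega⟩
          simp [h1, h2]
        · have h2 : ¬ (j ≤ k ∧ k < j + (m + 1)) := by omega
          simp [h2]
          omega

theorem aLoop_eq_bLoop (b a : List Int) (n : Nat) :
    ∀ (i : Nat), i + n ≤ b.length → ∀ (l : List Int) (flipped : Bool) (c : Int),
      l.length = b.length →
      (∀ k, i ≤ k → k < i + n → l.getD k 0 = if flipped then 1 - b.getD k 0 else b.getD k 0) →
      aLoop a n l i c = bLoop b a n i flipped c := by
  induction n with
  | zero => intro i _ l flipped c _ _; rfl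
  | succ m ih =>
      intro i hlen l flipped c hl hinv
      have hib : i < b.length := by omega
      have hx : l.getD i 0 = if flipped then 1 - b.getD i 0 else b.getD i 0 :=
        hinv i (le_refl i) (by omega)
      have hA : aLoop a m (flipLoop (m+1) l i) (i+1) (c+1) = bLoop b a m (i+1) (!flipped) (c+1) := by
        apply ih (i+1) (by omega) _ (!flipped) (c+1) (by rw [flipLoop_length, hl])
        intro k hk1 hk2
        rw [flipLoop_getD _ _ _ _ (by omega), if_pos ⟨by omega, by omega⟩,
          hinv k (by omega) (by omega)]
        cases flipped <;> simp [sub_sub_cancel]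
      have hB : aLoop a m l (i+1) c = bLoop b a m (i+1) flipped c := by
        apply ih (i+1) (by omega) l flipped c hl
        intro k hk1 hk2
        exact hinv k (by omega) (by omega)
      rw [aLoop, bLoop]
      simp only [PySem.List.pyGetD_natCast, hx]
      by_cases hc : (if flipped then 1 - b.getD i 0 else b.getD i 0) ≠ a.getD i 0
      · rw [if_pos hc, if_pos hc]; exact hA
      · rw [if_neg hc, if_neg hc]; exact hB

-- ===== VERDICT (by name: the statement is the Claim_ definition above) =====
theorem turn_switch_spec : Claim_equal_turn_switch := by
  intro N before after _ hpre
  unfold Spec_turn_switch turn_switch turn_switch_alt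
  exact aLoop_eq_bLoop before after N.toNat 0
    (by simpa using Int.toNat_le.mpr hpre.1) before false 0 rfl (fun k _ _ => by simp)
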